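-- pv_equiv track=rewrite | github.com/alacritty/alacritty-theme | alatheme.py | get_lines_between_marks
-- ===== SOURCE A (Python) =====
-- def get_lines_between_marks(list_lines: list, init_mark, end_mark) -> tuple[int, int]:
--
--     init: int = None
--     end: int = None
--     #search fo the marks in the list
--     for i, line in enumerate(list_lines):
--         if init_mark in line:
--             init = i
--         elif end_mark in line:
--             end = i
--     return (init, end)
-- ===== SOURCE B (Python) =====
-- def get_lines_between_marks(list_lines: list, init_mark, end_mark) -> tuple:
--     # Two independent right-to-left scans: init = last line containing init_mark;
--     # end = last line containing end_mark but not init_mark (A's elif gives init_mark priority).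
--     n = len(list_lines)
--     init = next((i for i in reversed(range(n)) if init_mark in list_lines[i]), None)
--     end = next((i for i in reversed(range(n))
--                 if end_mark in list_lines[i] and init_mark not in list_lines[i]), None)
--     return (init, end)
-- ===== Notes on version B (the rewrite author's own statement) =====
-- stated objective: alternative
-- what changed: Replaced the single forward loop mutating two accumulators with two independent right-to-left scans that each stop at the first (i.e. last) matching line.
import Mathlib
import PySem

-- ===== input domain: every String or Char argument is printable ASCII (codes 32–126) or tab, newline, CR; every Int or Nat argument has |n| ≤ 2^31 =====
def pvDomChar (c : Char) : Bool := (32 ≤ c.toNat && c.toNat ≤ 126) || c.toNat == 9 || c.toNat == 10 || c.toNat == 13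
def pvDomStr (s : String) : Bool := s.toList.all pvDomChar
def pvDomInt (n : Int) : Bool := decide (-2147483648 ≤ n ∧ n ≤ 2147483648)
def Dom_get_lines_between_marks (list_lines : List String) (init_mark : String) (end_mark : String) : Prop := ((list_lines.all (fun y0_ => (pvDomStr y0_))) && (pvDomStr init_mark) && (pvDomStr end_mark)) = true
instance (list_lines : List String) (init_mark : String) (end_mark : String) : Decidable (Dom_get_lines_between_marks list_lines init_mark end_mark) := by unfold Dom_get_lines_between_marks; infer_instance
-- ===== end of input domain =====

-- B replaces A's single forward loop over two mutable accumulators with two independent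
-- right-to-left scans, each returning at the last matching line (alternative decomposition).


-- ===== PORT A =====
-- for i, line in enumerate(list_lines): if init_mark in line: init = i elif end_mark in line: end = i
def get_lines_between_marks (list_lines : List String) (init_mark : String) (end_mark : String) : Option Int × Option Int :=
  (PySem.List.enumerate list_lines 0).foldl
    (fun st p =>
      if PySem.Str.isIn init_mark p.2 then (some p.1, st.2)
      else if PySem.Str.isIn end_mark p.2 then (st.1, some p.1)
      else st)
    (none, none)

-- ===== PORT B =====
-- next(... for i in reversed(...) if p(list_lines[i]) ...), None): first match scanning right-to-left
def pvFindRev (xs : List (Int × String)) (p : String → Bool) : Option Int :=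
  match xs with
  | [] => none
  | (i, l) :: rest => if p l then some i else pvFindRev rest p

def get_lines_between_marks_alt (list_lines : List String) (init_mark : String) (end_mark : String) : Option Int × Option Int :=
  let rev := (PySem.List.enumerate list_lines 0).reverse
  (pvFindRev rev (fun l => PySem.Str.isIn init_mark l),
   pvFindRev rev (fun l => PySem.Str.isIn end_mark l && !PySem.Str.isIn init_mark l))

-- ===== PRECONDITION & SPEC =====
def Spec_get_lines_between_marks (list_lines : List String) (init_mark : String) (end_mark : String) (out : Option Int × Option Int) : Prop := out = get_lines_between_marks_alt list_lines init_mark end_mark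
instance (list_lines : List String) (init_mark : String) (end_mark : String) (out : Option Int × Option Int) : Decidable (Spec_get_lines_between_marks list_lines init_mark end_mark out) := by unfold Spec_get_lines_between_marks; infer_instance

-- ===== CLAIM (what is proved, stated in full; the proofs are below) =====
def Claim_equal_get_lines_between_marks : Prop := ∀ (list_lines : List String) (init_mark : String) (end_mark : String), Dom_get_lines_between_marks list_lines init_mark end_mark → Spec_get_lines_between_marks list_lines init_mark end_mark (get_lines_between_marks list_lines init_mark end_mark)

-- ===== LEMMAS AND PROOFS =====

lemma pvFindRev_append (l : List (Int × String)) (y : Int × String) (p : String → Bool) :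
    pvFindRev (l ++ [y]) p = (pvFindRev l p).or (if p y.2 then some y.1 else none) := by
  induction l with
  | nil => cases y with | mk i s => simp [pvFindRev]
  | cons hd tl ih =>
      cases hd with | mk i s =>
      simp only [List.cons_append, pvFindRev]
      split <;> simp [ih]

lemma loopA_eq (p q : String → Bool) (xs : List (Int × String))
    (st : Option Int × Option Int) :
    xs.foldl
      (fun st x =>
        if p x.2 then (some x.1, st.2)
        else if q x.2 then (st.1, some x.1)
        else st) st
    = ((pvFindRev xs.reverse p).or st.1,
       (pvFindRev xs.reverse (fun l => q l && !p l)).or st.2) := by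
  induction xs generalizing st with
  | nil => simp [pvFindRev]
  | cons hd tl ih =>
      cases hd with | mk i l =>
      simp only [List.foldl_cons, ih, List.reverse_cons, pvFindRev_append, Option.or_assoc]
      by_cases h1 : p l <;> by_cases h2 : q l <;> simp [h1, h2]

-- ===== VERDICT (by name: the statement is the Claim_ definition above) =====
theorem get_lines_between_marks_spec : Claim_equal_get_lines_between_marks := by
  intro list_lines init_mark end_mark _
  unfold Spec_get_lines_between_marks get_lines_between_marks get_lines_between_marks_alt
  rw [loopA_eq]
  simp only [Option.or_none]
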